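-- pv_equiv track=rewrite | github.com/paa04/Comp-alg | Lab_03/poly.py | search_conf
-- ===== SOURCE A (Python) =====
-- def search_conf(arr, n, x):
--     if len(arr) <= n:
--         return arr
--
--     conf = arr[:n]
--
--     i = n
--
--     while conf[n // 2] < x and i < len(arr):
--         conf.append(arr[i])
--         i += 1
--         conf = conf[1:]
--
--     return conf
-- ===== SOURCE B (Python) =====
-- def search_conf(arr, n, x):
--     if len(arr) <= n:
--         return arr
--     mid = n // 2
--     s = 0
--     last = len(arr) - n
--     while s < last and arr[s + mid] < x:
--         s += 1
--     return arr[s:s + n]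
-- ===== Notes on version B (the rewrite author's own statement) =====
-- stated objective: alternative
-- what changed: Replaces A's sliding window list that is appended to and re-copied with conf[1:] at every step by a plain index scan for the first offset whose middle element reaches x, followed by a single slice (avoids rebuilding the window per step; worst-case O(len+n) vs O((len-n)*n), not confirmed faster on the benchmark inputs).
-- outside the precondition, e.g. on search_conf([1, 2], -1, 10): A returns [2], B returns []; on search_conf([5], 0, 3): A raises IndexError, B returns []
import Mathlib
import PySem

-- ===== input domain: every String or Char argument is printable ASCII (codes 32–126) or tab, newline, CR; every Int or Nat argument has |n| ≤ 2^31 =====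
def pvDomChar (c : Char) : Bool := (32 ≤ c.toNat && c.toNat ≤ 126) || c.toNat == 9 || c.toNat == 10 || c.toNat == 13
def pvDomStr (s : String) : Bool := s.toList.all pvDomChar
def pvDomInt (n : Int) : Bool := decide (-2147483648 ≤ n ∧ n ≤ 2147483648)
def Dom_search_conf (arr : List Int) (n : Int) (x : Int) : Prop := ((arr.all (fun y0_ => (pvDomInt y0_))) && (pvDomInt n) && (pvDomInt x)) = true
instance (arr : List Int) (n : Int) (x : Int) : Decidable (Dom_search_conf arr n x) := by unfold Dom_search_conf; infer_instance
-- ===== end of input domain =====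

-- B replaces A's window list that is re-copied (append + conf[1:]) at every slide by a plain
-- index scan followed by ONE slice (an alternative decomposition; no speed is claimed);
-- equivalence of return values is proved on Pre_ (n ≥ 1, plus the trivial empty input).

-- ===== PORT A =====
-- while conf[n//2] < x and i < len(arr): conf.append(arr[i]); i += 1; conf = conf[1:]
-- (fuel = number of remaining slide steps, a totality guard only: each iteration does i += 1
-- and the loop requires i < len(arr), so (len(arr) - i).toNat steps always suffice;
-- pyGetD is exact here: inside Pre_ every index taken is in range, where Python returns normally)
def searchConfLoop (arr : List Int) (n : Int) (x : Int) : Nat → List Int → Int → List Int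
  | 0, conf, _ => conf
  | fuel + 1, conf, i =>
    if PySem.List.pyGetD conf (PySem.Int.floordiv n 2) 0 < x ∧ i < PySem.List.len arr then
      searchConfLoop arr n x fuel
        (PySem.List.slice (conf ++ [PySem.List.pyGetD arr i 0]) (some 1) none) (i + 1)
    else conf

def search_conf (arr : List Int) (n : Int) (x : Int) : List Int :=
  if PySem.List.len arr ≤ n then arr
  else searchConfLoop arr n x (PySem.List.len arr - n).toNat (PySem.List.slice arr none (some n)) n

-- ===== PORT B =====
-- while s < last and arr[s + mid] < x: s += 1   (fuel: the scan stops before s reaches last)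
def searchConfScan (arr : List Int) (mid : Int) (x : Int) (last : Int) : Nat → Int → Int
  | 0, s => s
  | fuel + 1, s =>
    if s < last ∧ PySem.List.pyGetD arr (s + mid) 0 < x then
      searchConfScan arr mid x last fuel (s + 1)
    else s

def search_conf_alt (arr : List Int) (n : Int) (x : Int) : List Int :=
  if PySem.List.len arr ≤ n then arr
  else
    let mid := PySem.Int.floordiv n 2
    let last := PySem.List.len arr - n
    let s := searchConfScan arr mid x last last.toNat 0
    PySem.List.slice arr (some s) (some (s + n))

-- ===== PRECONDITION & SPEC =====
-- Pre_ restricts to the natural domain of a positive window length n ≥ 1 (plus the trivial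
-- empty input with n = 0): for other n ≤ 0 A either raises IndexError or returns a window
-- assembled through Python negative-index wraparound, outside the task's natural domain.
def Pre_search_conf (arr : List Int) (n : Int) (x : Int) : Prop :=
  1 ≤ n ∨ (arr = [] ∧ n = 0)
instance (arr : List Int) (n : Int) (x : Int) : Decidable (Pre_search_conf arr n x) := by
  unfold Pre_search_conf; infer_instance

def pvWitness_search_conf : List Int × Int × Int := ([1, 3, 5, 7], 2, 5)

def Spec_search_conf (arr : List Int) (n : Int) (x : Int) (out : List Int) : Prop := out = search_conf_alt arr n x
instance (arr : List Int) (n : Int) (x : Int) (out : List Int) : Decidable (Spec_search_conf arr n x out) := by unfold Spec_search_conf; infer_instance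

-- ===== CLAIM (what is proved, stated in full; the proofs are below) =====
def Claim_equal_search_conf : Prop := ∀ (arr : List Int) (n : Int) (x : Int), Dom_search_conf arr n x → Pre_search_conf arr n x → Spec_search_conf arr n x (search_conf arr n x)

-- ===== LEMMAS AND PROOFS =====

lemma searchConf_mid_cast (nn : Nat) :
    PySem.Int.floordiv (nn : Int) 2 = ((nn / 2 : Nat) : Int) := by
  exact_mod_cast PySem.Int.floordiv_natCast nn 2

-- joint induction: A's sliding-window loop started at window k equals B's index scan started at k
lemma searchConf_loop_eq_scan (arr : List Int) (x : Int) (nn : Nat)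
    (h1 : 1 ≤ nn) (hlt : nn < arr.length) :
    ∀ fuel k : Nat, k + fuel = arr.length - nn →
    ∃ s : Nat, s ≤ arr.length - nn ∧
      searchConfScan arr ((nn / 2 : Nat) : Int) x ((arr.length : Int) - (nn : Int)) fuel (k : Int) = (s : Int) ∧
      searchConfLoop arr (nn : Int) x fuel ((arr.drop k).take nn) ((nn : Int) + (k : Int)) = (arr.drop s).take nn := by
  intro fuel
  induction fuel with
  | zero =>
    intro k hk
    exact ⟨k, by omega, rfl, rfl⟩
  | succ fuel ih =>
    intro k hk
    have hkle : k < arr.length - nn := by omega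
    have hconf_len : ((arr.drop k).take nn).length = nn := by
      simp [List.length_take, List.length_drop]; omega
    have hmidlt : nn / 2 < nn := Nat.div_lt_self (by omega) (by omega)
    have hidx : k + nn / 2 < arr.length := by omega
    -- the tested element is arr[k + nn/2] on both sides
    have hconf_get :
        PySem.List.pyGetD ((arr.drop k).take nn) (PySem.Int.floordiv (nn : Int) 2) 0
          = arr[k + nn / 2]'hidx := by
      rw [searchConf_mid_cast, PySem.List.pyGetD_natCast]
      rw [List.getD_eq_getElem _ _ (by omega)]
      simp [List.getElem_take, List.getElem_drop]
    have harr_get :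
        PySem.List.pyGetD arr ((k : Int) + ((nn / 2 : Nat) : Int)) 0 = arr[k + nn / 2]'hidx := by
      have : ((k : Int) + ((nn / 2 : Nat) : Int)) = ((k + nn / 2 : Nat) : Int) := by push_cast; ring
      rw [this, PySem.List.pyGetD_natCast, List.getD_eq_getElem _ _ (by omega)]
    by_cases hx : arr[k + nn / 2]'hidx < x
    · -- both loops step to k + 1
      have hstep : ((arr.drop k).take nn ++ [PySem.List.pyGetD arr ((nn : Int) + (k : Int)) 0]).drop 1
          = (arr.drop (k + 1)).take nn := by
        have hnk : nn + k < arr.length := by omega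
        have hget : PySem.List.pyGetD arr ((nn : Int) + (k : Int)) 0 = arr[k + nn]'(by omega) := by
          have : ((nn : Int) + (k : Int)) = ((k + nn : Nat) : Int) := by push_cast; ring
          rw [this, PySem.List.pyGetD_natCast, List.getD_eq_getElem _ _ (by omega)]
        rw [hget]
        have hdk : nn < (arr.drop k).length := by simp [List.length_drop]; omega
        have : (arr.drop k).take nn ++ [arr[k + nn]'(by omega)] = (arr.drop k).take (nn + 1) := by
          rw [List.take_add_one]
          have : (arr.drop k)[nn]? = some (arr[k + nn]'(by omega)) := by
            rw [List.getElem?_eq_getElem hdk]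
            simp only [List.getElem_drop]
          rw [this]
          rfl
        rw [this]
        rw [List.drop_take]
        simp only [List.drop_drop]
        norm_num
      obtain ⟨s, hs1, hs2, hs3⟩ := ih (k + 1) (by omega)
      refine ⟨s, hs1, ?_, ?_⟩
      · rw [searchConfScan, if_pos ⟨by omega, by rw [harr_get]; exact hx⟩]
        have : ((k : Int) + 1) = ((k + 1 : Nat) : Int) := by push_cast; ring_nf
        rw [this, hs2]
      · rw [searchConfLoop, if_pos ⟨by rw [hconf_get]; exact hx,
            by simp only [PySem.List.len_eq]; omega⟩]
        rw [PySem.List.slice_from_one, ← List.drop_one, hstep]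
        have : ((nn : Int) + (k : Int) + 1) = ((nn : Int) + ((k + 1 : Nat) : Int)) := by push_cast; ring
        rw [this, hs3]
    · -- both loops stop at k
      refine ⟨k, by omega, ?_, ?_⟩
      · rw [searchConfScan, if_neg]
        intro hcon
        rw [harr_get] at hcon
        exact hx hcon.2
      · rw [searchConfLoop, if_neg]
        intro hcon
        rw [hconf_get] at hcon
        exact hx hcon.1

-- ===== VERDICT (by name: the statement is the Claim_ definition above) =====
theorem search_conf_spec : Claim_equal_search_conf := by
  intro arr n x _hdom hpre
  unfold Spec_search_conf
  by_cases hle : PySem.List.len arr ≤ n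
  · unfold search_conf search_conf_alt
    rw [if_pos hle, if_pos hle]
  · have hlen : ¬ ((arr.length : Int) ≤ n) := by simpa [PySem.List.len_eq] using hle
    have hn1 : 1 ≤ n := by
      rcases hpre with h | ⟨ha, hn⟩
      · exact h
      · subst ha; subst hn; simp at hlen
    obtain ⟨nn, rfl⟩ : ∃ nn : Nat, n = (nn : Int) := ⟨n.toNat, by omega⟩
    have hnn1 : 1 ≤ nn := by exact_mod_cast hn1
    have hnnlt : nn < arr.length := by omega
    have hfuel : (PySem.List.len arr - (nn : Int)).toNat = arr.length - nn := by
      simp only [PySem.List.len_eq]; omega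
    obtain ⟨s, hs1, hs2, hs3⟩ :=
      searchConf_loop_eq_scan arr x nn hnn1 hnnlt (arr.length - nn) 0 (by omega)
    unfold search_conf search_conf_alt
    rw [if_neg hle, if_neg hle]
    simp only []
    rw [hfuel]
    have hscan : searchConfScan arr (PySem.Int.floordiv (nn : Int) 2) x
        (PySem.List.len arr - (nn : Int)) (arr.length - nn) 0 = (s : Int) := by
      rw [searchConf_mid_cast, PySem.List.len_eq]
      simpa using hs2
    rw [hscan]
    have hslice : PySem.List.slice arr (some (s : Int)) (some ((s : Int) + (nn : Int)))
        = (arr.drop s).take nn := by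
      rw [PySem.List.slice_natCast_add]
    rw [hslice]
    have hinit : PySem.List.slice arr none (some ((nn : Int))) = (arr.drop 0).take nn := by
      rw [PySem.List.slice_to_natCast]; simp
    rw [hinit]
    have : ((nn : Int) + ((0 : Nat) : Int)) = (nn : Int) := by simp
    rw [← this] at *
    simpa using hs3
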